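-- pv_equiv track=rewrite | github.com/LEGENDBOSS123/All-My-Files | usaco.py | ANSWERFIND
-- ===== SOURCE A (Python) =====
-- def ANSWERFIND(INPUT):
--     all_inputs = INPUT[1:]
--     for i in range(len(all_inputs)):
--         e = all_inputs[i].split()
--         all_inputs[i]=[int(e[0]),int(e[1])]
--     combos = [[1,2,3],[1,3,2],[2,1,3],[2,3,1],[3,1,2],[3,2,1]]
--     ret = 0
--     for z in combos:
--         ret2 = 0
--         for i in all_inputs:
--             if [z[0],z[1]] == i:
--                 ret2+=1
--             elif [z[1],z[2]] == i:
--                 ret2+=1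
--             elif [z[2],z[0]] == i:
--                 ret2+=1
--
--         if ret2>ret:
--             ret = ret2
--     return ret
-- ===== SOURCE B (Python) =====
-- def ANSWERFIND(INPUT):
--     c12 = c21 = c13 = c31 = c23 = c32 = 0
--     for line in INPUT[1:]:
--         e = line.split()
--         a = int(e[0])
--         b = int(e[1])
--         if (a, b) == (1, 2):
--             c12 += 1
--         elif (a, b) == (2, 1):
--             c21 += 1
--         elif (a, b) == (1, 3):
--             c13 += 1
--         elif (a, b) == (3, 1):
--             c31 += 1
--         elif (a, b) == (2, 3):
--             c23 += 1
--         elif (a, b) == (3, 2):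
--             c32 += 1
--     # the 6 permutations yield only the two cyclic orientations 1->2->3->1 and 1->3->2->1
--     return max(0, c12 + c23 + c31, c13 + c32 + c21)
-- ===== Notes on version B (the rewrite author's own statement) =====
-- stated objective: simpler
-- what changed: B makes one pass keeping six counters of the directed pairs and returns max(0, s1, s2) of the two cyclic-orientation sums, exploiting that A's six permutations generate only two distinct pair-sets, instead of A's permutation loop with six full scans.
import Mathlib
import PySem

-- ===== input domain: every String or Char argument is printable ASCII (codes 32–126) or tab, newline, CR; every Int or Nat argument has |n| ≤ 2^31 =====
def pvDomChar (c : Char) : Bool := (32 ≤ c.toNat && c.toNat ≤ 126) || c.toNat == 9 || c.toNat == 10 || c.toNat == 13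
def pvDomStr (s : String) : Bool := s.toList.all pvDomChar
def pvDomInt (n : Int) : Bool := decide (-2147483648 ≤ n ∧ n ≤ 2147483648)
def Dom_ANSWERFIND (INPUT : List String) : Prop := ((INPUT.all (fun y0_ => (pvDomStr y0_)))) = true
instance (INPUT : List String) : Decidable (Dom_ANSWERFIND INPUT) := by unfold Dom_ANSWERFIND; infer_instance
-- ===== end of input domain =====

-- B counts the six relevant directed pairs with six counters in one pass and returns
-- max(0, s1, s2) of the two cyclic-orientation sums, instead of A's six full scans —
-- correct because A's 6 permutations produce only those 2 distinct cyclic pair-sets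
-- (objective: simpler single pass, no permutation loop).

-- ===== PORT A =====
-- Python's in-place `all_inputs[i] = [int(e[0]), int(e[1])]` index loop changes the element
-- type, so it is ported as the element-wise map it performs; parsing is exact via PySem
-- (pyGetD/ofStr? are total stand-ins, exact under Pre_ which demands two parsable tokens).
def pvParse (s : String) : Int × Int :=
  let e := PySem.Str.split₀ s
  ((PySem.Int.ofStr? (PySem.List.pyGetD e 0 "")).getD 0,
   (PySem.Int.ofStr? (PySem.List.pyGetD e 1 "")).getD 0)

def ANSWERFIND (INPUT : List String) : Int :=
  let all_inputs := (PySem.List.slice INPUT (some 1) none).map pvParse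
  let combos : List (Int × Int × Int) := [(1,2,3),(1,3,2),(2,1,3),(2,3,1),(3,1,2),(3,2,1)]
  combos.foldl (fun ret z =>
    let ret2 := all_inputs.foldl (fun r2 i =>
      if (z.1, z.2.1) = i then r2 + 1
      else if (z.2.1, z.2.2) = i then r2 + 1
      else if (z.2.2, z.1) = i then r2 + 1
      else r2) 0
    if ret2 > ret then ret2 else ret) 0

-- ===== PORT B =====
-- one loop body = Python B's if/elif chain over the six counters
def bStep (st : Int × Int × Int × Int × Int × Int) (line : String) :
    Int × Int × Int × Int × Int × Int :=
  let e := PySem.Str.split₀ line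
  let a := (PySem.Int.ofStr? (PySem.List.pyGetD e 0 "")).getD 0
  let b := (PySem.Int.ofStr? (PySem.List.pyGetD e 1 "")).getD 0
  let (c12, c21, c13, c31, c23, c32) := st
  if (a, b) = ((1 : Int), (2 : Int)) then (c12 + 1, c21, c13, c31, c23, c32)
  else if (a, b) = ((2 : Int), (1 : Int)) then (c12, c21 + 1, c13, c31, c23, c32)
  else if (a, b) = ((1 : Int), (3 : Int)) then (c12, c21, c13 + 1, c31, c23, c32)
  else if (a, b) = ((3 : Int), (1 : Int)) then (c12, c21, c13, c31 + 1, c23, c32)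
  else if (a, b) = ((2 : Int), (3 : Int)) then (c12, c21, c13, c31, c23 + 1, c32)
  else if (a, b) = ((3 : Int), (2 : Int)) then (c12, c21, c13, c31, c23, c32 + 1)
  else (c12, c21, c13, c31, c23, c32)

def ANSWERFIND_alt (INPUT : List String) : Int :=
  let (c12, c21, c13, c31, c23, c32) :=
    (PySem.List.slice INPUT (some 1) none).foldl bStep (0, 0, 0, 0, 0, 0)
  max (max 0 (c12 + c23 + c31)) (c13 + c32 + c21)

-- ===== PRECONDITION & SPEC =====
-- Pre_ excludes exactly the inputs where A raises: a line after the first with fewer than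
-- two whitespace-separated tokens (IndexError) or a token int() rejects (ValueError).
def Pre_ANSWERFIND (INPUT : List String) : Prop :=
  ∀ s ∈ INPUT.drop 1,
    2 ≤ (PySem.Str.split₀ s).length ∧
    (PySem.Int.ofStr? ((PySem.Str.split₀ s).getD 0 "")).isSome = true ∧
    (PySem.Int.ofStr? ((PySem.Str.split₀ s).getD 1 "")).isSome = true
instance (INPUT : List String) : Decidable (Pre_ANSWERFIND INPUT) := by
  unfold Pre_ANSWERFIND; infer_instance
def pvWitness_ANSWERFIND : List String := ["3", "1 2", "2 3", "1 2"]

def Spec_ANSWERFIND (INPUT : List String) (out : Int) : Prop := out = ANSWERFIND_alt INPUT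
instance (INPUT : List String) (out : Int) : Decidable (Spec_ANSWERFIND INPUT out) := by
  unfold Spec_ANSWERFIND; infer_instance

-- ===== CLAIM (what is proved, stated in full; the proofs are below) =====
def Claim_equal_ANSWERFIND : Prop := ∀ (INPUT : List String), Dom_ANSWERFIND INPUT → Pre_ANSWERFIND INPUT → Spec_ANSWERFIND INPUT (ANSWERFIND INPUT)

-- ===== LEMMAS AND PROOFS =====

-- A's elif chain counts each element once; with the three pairs pairwise distinct the
-- inner scan is the sum of the three multiplicities.
theorem elif_count (p q r : Int × Int) (hpq : p ≠ q) (hqr : q ≠ r) (hpr : p ≠ r)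
    (l : List (Int × Int)) (init : Int) :
    l.foldl (fun r2 i =>
      if p = i then r2 + 1 else if q = i then r2 + 1 else if r = i then r2 + 1 else r2) init
    = init + l.count p + l.count q + l.count r := by
  induction l generalizing init with
  | nil => simp
  | cons x xs ih =>
    simp only [List.foldl_cons, ih, List.count_cons, beq_iff_eq]
    by_cases h1 : p = x
    · rw [if_pos h1, if_pos h1.symm,
        if_neg (fun hh : x = q => hpq (h1.trans hh)),
        if_neg (fun hh : x = r => hpr (h1.trans hh))]
      push_cast; omega
    · by_cases h2 : q = x
      · rw [if_neg h1, if_pos h2, if_neg (fun hh : x = p => h1 hh.symm),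
          if_pos h2.symm, if_neg (fun hh : x = r => hqr (h2.trans hh))]
        push_cast; omega
      · by_cases h3 : r = x
        · rw [if_neg h1, if_neg h2, if_pos h3, if_neg (fun hh : x = p => h1 hh.symm),
            if_neg (fun hh : x = q => h2 hh.symm), if_pos h3.symm]
          push_cast; omega
        · rw [if_neg h1, if_neg h2, if_neg h3, if_neg (fun hh : x = p => h1 hh.symm),
            if_neg (fun hh : x = q => h2 hh.symm), if_neg (fun hh : x = r => h3 hh.symm)]
          push_cast; omega

-- B's six-counter fold computes the multiplicity of each of the six keys among the
-- parsed pairs.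
theorem counters (xs : List String) (st : Int × Int × Int × Int × Int × Int) :
    xs.foldl bStep st =
      (st.1 + ((xs.map pvParse).count (1, 2) : Int),
       st.2.1 + ((xs.map pvParse).count (2, 1) : Int),
       st.2.2.1 + ((xs.map pvParse).count (1, 3) : Int),
       st.2.2.2.1 + ((xs.map pvParse).count (3, 1) : Int),
       st.2.2.2.2.1 + ((xs.map pvParse).count (2, 3) : Int),
       st.2.2.2.2.2 + ((xs.map pvParse).count (3, 2) : Int)) := by
  induction xs generalizing st with
  | nil => simp
  | cons x xs ih =>
    obtain ⟨c12, c21, c13, c31, c23, c32⟩ := st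
    have hx : bStep (c12, c21, c13, c31, c23, c32) x =
        (if pvParse x = (1, 2) then (c12 + 1, c21, c13, c31, c23, c32)
         else if pvParse x = (2, 1) then (c12, c21 + 1, c13, c31, c23, c32)
         else if pvParse x = (1, 3) then (c12, c21, c13 + 1, c31, c23, c32)
         else if pvParse x = (3, 1) then (c12, c21, c13, c31 + 1, c23, c32)
         else if pvParse x = (2, 3) then (c12, c21, c13, c31, c23 + 1, c32)
         else if pvParse x = (3, 2) then (c12, c21, c13, c31, c23, c32 + 1)
         else (c12, c21, c13, c31, c23, c32)) := by
      rfl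
    rw [List.foldl_cons, hx]
    split_ifs with h1 h2 h3 h4 h5 h6 <;>
      rw [ih] <;>
      simp_all [List.count_cons, Prod.ext_iff] <;>
      omega

-- ===== VERDICT (by name: the statement is the Claim_ definition above) =====
theorem ANSWERFIND_spec : Claim_equal_ANSWERFIND := by
  intro INPUT _ _
  unfold Spec_ANSWERFIND ANSWERFIND ANSWERFIND_alt
  simp only [List.foldl_cons, List.foldl_nil]
  rw [elif_count _ _ _ (by decide) (by decide) (by decide),
      elif_count _ _ _ (by decide) (by decide) (by decide),
      elif_count _ _ _ (by decide) (by decide) (by decide),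
      elif_count _ _ _ (by decide) (by decide) (by decide),
      elif_count _ _ _ (by decide) (by decide) (by decide),
      elif_count _ _ _ (by decide) (by decide) (by decide)]
  rw [counters]
  simp only [zero_add]
  generalize ((PySem.List.slice INPUT (some 1) none).map pvParse).count ((1 : Int), (2 : Int)) = n12
  generalize ((PySem.List.slice INPUT (some 1) none).map pvParse).count ((2 : Int), (1 : Int)) = n21
  generalize ((PySem.List.slice INPUT (some 1) none).map pvParse).count ((1 : Int), (3 : Int)) = n13
  generalize ((PySem.List.slice INPUT (some 1) none).map pvParse).count ((3 : Int), (1 : Int)) = n31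
  generalize ((PySem.List.slice INPUT (some 1) none).map pvParse).count ((2 : Int), (3 : Int)) = n23
  generalize ((PySem.List.slice INPUT (some 1) none).map pvParse).count ((3 : Int), (2 : Int)) = n32
  simp only [max_def]
  split_ifs <;> push_cast <;> omega
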